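-- pv_equiv track=rewrite | github.com/mrnobody0000/KaptainOvi.py | k@ptaiovi_lite.py | analyze_banner_lines
-- ===== SOURCE A (Python) =====
-- def analyze_banner_lines(lines):
--     """Lightweight heuristics to guess service and OS from banner lines."""
--     service = "unknown"
--     os_hint = "unknown"
--     for ln in lines:
--         l = ln.lower()
--         # service hints
--         if "nginx" in l: service = "nginx"
--         if "apache" in l: service = "apache"
--         if "iis" in l or "microsoft-iis" in l: service = "iis"
--         if "ssh" in l or "openssh" in l: service = "ssh"
--         if "mysql" in l: service = "mysql"
--         if "postgres" in l: service = "postgres"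
--         # os hints by common strings
--         if "ubuntu" in l or "debian" in l: os_hint = "Linux (Debian/Ubuntu)"
--         if "centos" in l or "red hat" in l: os_hint = "Linux (CentOS/RedHat)"
--         if "windows" in l or "iis" in l: os_hint = "Windows"
--         if "darwin" in l or "apple" in l: os_hint = "macOS"
--     return service, os_hint
-- ===== SOURCE B (Python) =====
-- # B: reverse scan with early exit -- find the LAST matching line/rule directly
-- # instead of A's forward fold that keeps overwriting its state.
-- SERVICE_RULES = [
--     (("nginx",), "nginx"),
--     (("apache",), "apache"),
--     (("iis", "microsoft-iis"), "iis"),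
--     (("ssh", "openssh"), "ssh"),
--     (("mysql",), "mysql"),
--     (("postgres",), "postgres"),
-- ]
--
-- OS_RULES = [
--     (("ubuntu", "debian"), "Linux (Debian/Ubuntu)"),
--     (("centos", "red hat"), "Linux (CentOS/RedHat)"),
--     (("windows", "iis"), "Windows"),
--     (("darwin", "apple"), "macOS"),
-- ]
--
--
-- def _last_hit(lines, rules):
--     # walk backwards; the first line containing any keyword decides,
--     # and within that line the last rule of the table that matches wins.
--     for ln in reversed(lines):
--         l = ln.lower()
--         for subs, name in reversed(rules):
--             if any(s in l for s in subs):
--                 return name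
--     return "unknown"
--
--
-- def analyze_banner_lines(lines):
--     """Lightweight heuristics to guess service and OS from banner lines."""
--     return _last_hit(lines, SERVICE_RULES), _last_hit(lines, OS_RULES)
-- ===== Notes on version B (the rewrite author's own statement) =====
-- stated objective: alternative
-- what changed: A folds forward over all lines, overwriting service/os state; B scans the lines (and the rule table) in reverse and returns on the first hit, finding the last match directly with early exit.
import Mathlib
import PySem

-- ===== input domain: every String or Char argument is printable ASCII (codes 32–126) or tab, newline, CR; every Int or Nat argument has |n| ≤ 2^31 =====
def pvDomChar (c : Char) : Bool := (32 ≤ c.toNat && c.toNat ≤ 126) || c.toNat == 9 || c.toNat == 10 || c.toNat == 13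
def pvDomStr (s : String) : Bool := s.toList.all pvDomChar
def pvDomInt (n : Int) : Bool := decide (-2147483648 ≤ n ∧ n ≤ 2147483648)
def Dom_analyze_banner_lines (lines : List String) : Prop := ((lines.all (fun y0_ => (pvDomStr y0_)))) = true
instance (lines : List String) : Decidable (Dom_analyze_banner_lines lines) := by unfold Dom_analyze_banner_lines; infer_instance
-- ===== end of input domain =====

-- B replaces A's forward overwrite-fold by a reverse scan with early exit that finds the last match directly (alternative algorithm; return value only).


-- ===== PORT A =====
-- one iteration of A's loop body: l = ln.lower(); the chained ifs on (service, os_hint)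
def pvStepA (st : String × String) (ln : String) : String × String :=
  let l := PySem.Str.lower ln
  let service := st.1
  let os_hint := st.2
  let service := if PySem.Str.isIn "nginx" l then "nginx" else service
  let service := if PySem.Str.isIn "apache" l then "apache" else service
  let service := if PySem.Str.isIn "iis" l || PySem.Str.isIn "microsoft-iis" l then "iis" else service
  let service := if PySem.Str.isIn "ssh" l || PySem.Str.isIn "openssh" l then "ssh" else service
  let service := if PySem.Str.isIn "mysql" l then "mysql" else service
  let service := if PySem.Str.isIn "postgres" l then "postgres" else service
  let os_hint := if PySem.Str.isIn "ubuntu" l || PySem.Str.isIn "debian" l then "Linux (Debian/Ubuntu)" else os_hint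
  let os_hint := if PySem.Str.isIn "centos" l || PySem.Str.isIn "red hat" l then "Linux (CentOS/RedHat)" else os_hint
  let os_hint := if PySem.Str.isIn "windows" l || PySem.Str.isIn "iis" l then "Windows" else os_hint
  let os_hint := if PySem.Str.isIn "darwin" l || PySem.Str.isIn "apple" l then "macOS" else os_hint
  (service, os_hint)

def analyze_banner_lines (lines : List String) : String × String :=
  lines.foldl pvStepA ("unknown", "unknown")

-- ===== PORT B =====
def pvSERVICE_RULES : List (List String × String) :=
  [(["nginx"], "nginx"), (["apache"], "apache"), (["iis", "microsoft-iis"], "iis"),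
   (["ssh", "openssh"], "ssh"), (["mysql"], "mysql"), (["postgres"], "postgres")]

def pvOS_RULES : List (List String × String) :=
  [(["ubuntu", "debian"], "Linux (Debian/Ubuntu)"), (["centos", "red hat"], "Linux (CentOS/RedHat)"),
   (["windows", "iis"], "Windows"), (["darwin", "apple"], "macOS")]

-- 'any(s in l for s in subs)'
def pvMatch (l : String) (r : List String × String) : Bool :=
  r.1.any (fun s => PySem.Str.isIn s l)

-- _last_hit: walk reversed(lines); first line with a hit decides via the first
-- matching rule of reversed(rules); early return.  (lns is already reversed.)
def pvLastHit (lns : List String) (rules : List (List String × String)) : String :=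
  match lns with
  | [] => "unknown"
  | ln :: rest =>
    let l := PySem.Str.lower ln
    match List.find? (pvMatch l) rules.reverse with
    | some r => r.2
    | none => pvLastHit rest rules

def analyze_banner_lines_alt (lines : List String) : String × String :=
  (pvLastHit lines.reverse pvSERVICE_RULES, pvLastHit lines.reverse pvOS_RULES)

-- ===== PRECONDITION & SPEC =====
def Spec_analyze_banner_lines (lines : List String) (out : String × String) : Prop := out = analyze_banner_lines_alt lines
instance (lines : List String) (out : String × String) : Decidable (Spec_analyze_banner_lines lines out) := by unfold Spec_analyze_banner_lines; infer_instance

-- ===== CLAIM (what is proved, stated in full; the proofs are below) =====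
def Claim_equal_analyze_banner_lines : Prop := ∀ (lines : List String), Dom_analyze_banner_lines lines → Spec_analyze_banner_lines lines (analyze_banner_lines lines)

-- ===== LEMMAS AND PROOFS =====
-- proof-only: the hit of a (reversed) line list as an Option, none = no line matched
def pvHitOpt (lns : List String) (rules : List (List String × String)) : Option String :=
  match lns with
  | [] => none
  | ln :: rest =>
    match List.find? (pvMatch (PySem.Str.lower ln)) rules.reverse with
    | some r => some r.2
    | none => pvHitOpt rest rules

theorem pvLastHit_eq_opt (lns : List String) (rules : List (List String × String)) :
    pvLastHit lns rules = (pvHitOpt lns rules).getD "unknown" := by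
  induction lns with
  | nil => rfl
  | cons ln rest ih =>
    simp only [pvLastHit, pvHitOpt]
    cases List.find? (pvMatch (PySem.Str.lower ln)) rules.reverse with
    | none => simpa using ih
    | some r => rfl

-- the service component of one A-step is the last matching service rule, if any
theorem pvStepA_fst (st : String × String) (ln : String) :
    (pvStepA st ln).1 =
      (((List.find? (pvMatch (PySem.Str.lower ln)) pvSERVICE_RULES.reverse).map Prod.snd).getD st.1) := by
  simp only [pvStepA, pvSERVICE_RULES, pvMatch, List.reverse, List.find?, List.any,
    List.reverseAux]
  generalize PySem.Str.isIn "nginx" (PySem.Str.lower ln) = b1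
  generalize PySem.Str.isIn "apache" (PySem.Str.lower ln) = b2
  generalize PySem.Str.isIn "iis" (PySem.Str.lower ln) = b3
  generalize PySem.Str.isIn "microsoft-iis" (PySem.Str.lower ln) = b4
  generalize PySem.Str.isIn "ssh" (PySem.Str.lower ln) = b5
  generalize PySem.Str.isIn "openssh" (PySem.Str.lower ln) = b6
  generalize PySem.Str.isIn "mysql" (PySem.Str.lower ln) = b7
  generalize PySem.Str.isIn "postgres" (PySem.Str.lower ln) = b8
  cases b1 <;> cases b2 <;> cases b3 <;> cases b4 <;> cases b5 <;> cases b6 <;> cases b7 <;> cases b8 <;> rfl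

theorem pvStepA_snd (st : String × String) (ln : String) :
    (pvStepA st ln).2 =
      (((List.find? (pvMatch (PySem.Str.lower ln)) pvOS_RULES.reverse).map Prod.snd).getD st.2) := by
  simp only [pvStepA, pvOS_RULES, pvMatch, List.reverse, List.find?, List.any,
    List.reverseAux]
  generalize PySem.Str.isIn "ubuntu" (PySem.Str.lower ln) = b1
  generalize PySem.Str.isIn "debian" (PySem.Str.lower ln) = b2
  generalize PySem.Str.isIn "centos" (PySem.Str.lower ln) = b3
  generalize PySem.Str.isIn "red hat" (PySem.Str.lower ln) = b4
  generalize PySem.Str.isIn "windows" (PySem.Str.lower ln) = b5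
  generalize PySem.Str.isIn "iis" (PySem.Str.lower ln) = b6
  generalize PySem.Str.isIn "darwin" (PySem.Str.lower ln) = b7
  generalize PySem.Str.isIn "apple" (PySem.Str.lower ln) = b8
  cases b1 <;> cases b2 <;> cases b3 <;> cases b4 <;> cases b5 <;> cases b6 <;> cases b7 <;> cases b8 <;> rfl

theorem pvFold_fst (lines : List String) (st : String × String) :
    (lines.foldl pvStepA st).1 = (pvHitOpt lines.reverse pvSERVICE_RULES).getD st.1 := by
  induction lines using List.reverseRecOn generalizing st with
  | nil => rfl
  | append_singleton xs x ih =>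
    rw [List.foldl_append, List.foldl_cons, List.foldl_nil, pvStepA_fst, List.reverse_append]
    simp only [List.reverse_singleton, List.singleton_append, pvHitOpt]
    cases List.find? (pvMatch (PySem.Str.lower x)) pvSERVICE_RULES.reverse with
    | none => simpa using ih st
    | some r => rfl

theorem pvFold_snd (lines : List String) (st : String × String) :
    (lines.foldl pvStepA st).2 = (pvHitOpt lines.reverse pvOS_RULES).getD st.2 := by
  induction lines using List.reverseRecOn generalizing st with
  | nil => rfl
  | append_singleton xs x ih =>
    rw [List.foldl_append, List.foldl_cons, List.foldl_nil, pvStepA_snd, List.reverse_append]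
    simp only [List.reverse_singleton, List.singleton_append, pvHitOpt]
    cases List.find? (pvMatch (PySem.Str.lower x)) pvOS_RULES.reverse with
    | none => simpa using ih st
    | some r => rfl

-- ===== VERDICT (by name: the statement is the Claim_ definition above) =====
theorem analyze_banner_lines_spec : Claim_equal_analyze_banner_lines := by
  intro lines _
  unfold Spec_analyze_banner_lines analyze_banner_lines analyze_banner_lines_alt
  have h1 := pvFold_fst lines ("unknown", "unknown")
  have h2 := pvFold_snd lines ("unknown", "unknown")
  simp only [Prod.ext_iff, pvLastHit_eq_opt]
  exact ⟨h1, h2⟩
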